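-- pv_equiv track=rewrite | github.com/pvlvnk/tasks_for_perfomance_lab | task1/task1.py | get_way
-- ===== SOURCE A (Python) =====
-- def get_way(n: int, m: int):
--     """Выводит путь, по которому, двигаясь интервалом длины m по заданному
--     массиву, концом будет являться первый элемент.
--
--     """
--     i = 1
--     way = '1'
--     while True:
--         i = 1 + (i + m - 2) % n
--         if i == 1:
--             break
--         way += str(i)
--     return way
-- ===== SOURCE B (Python) =====
-- def get_way(n: int, m: int):
--     # Closed-form cycle: the visited positions are 1 + (k*(m-1)) % n for
--     # k = 0 .. period-1, where period = |n| / gcd(|n|, |m-1|); build the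
--     # whole string at once with join instead of looping until the break.
--     d = m - 1
--     if d % n == 0:
--         return '1'
--     a, b = abs(n), abs(d)
--     while b:
--         a, b = b, a % b
--     period = abs(n) // a
--     return ''.join(str(1 + (k * d) % n) for k in range(period))
-- ===== Notes on version B (the rewrite author's own statement) =====
-- stated objective: alternative
-- what changed: B replaces A's break-on-return while-loop over a running position by a closed-form construction: it computes the cycle length |n|/gcd(|n|,|m-1|) with Euclid's algorithm up front and builds the whole string with one join of str(1+(k*(m-1))%n) over range(period).
-- outside the precondition, e.g. on get_way(0, 3): A raises ZeroDivisionError, B raises ZeroDivisionError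
import Mathlib
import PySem

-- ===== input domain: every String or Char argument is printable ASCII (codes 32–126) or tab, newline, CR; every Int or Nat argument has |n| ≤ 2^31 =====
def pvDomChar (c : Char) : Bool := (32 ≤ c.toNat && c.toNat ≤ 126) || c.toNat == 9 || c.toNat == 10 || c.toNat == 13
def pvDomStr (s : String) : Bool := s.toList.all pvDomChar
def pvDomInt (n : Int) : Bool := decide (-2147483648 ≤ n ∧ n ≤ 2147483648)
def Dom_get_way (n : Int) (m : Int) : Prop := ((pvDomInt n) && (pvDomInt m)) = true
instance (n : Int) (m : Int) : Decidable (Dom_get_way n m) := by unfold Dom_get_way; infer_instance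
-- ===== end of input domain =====

-- B computes the cycle length |n|/gcd(|n|,|m-1|) up front (Euclid) and builds the
-- whole string with one join over range(period), instead of A's while-loop that
-- steps a running position until it returns to 1 (objective: alternative).

-- ===== PORT A =====
-- A's while-loop: state is the current position i and the accumulated string;
-- fuel n.natAbs bounds the iterations (the loop breaks after at most |n| steps).
def get_wayLoop (n : Int) (m : Int) : Nat → Int → String → String
  | 0, _, way => way
  | fuel + 1, i, way =>
    let i' := 1 + PySem.Int.mod (i + m - 2) n
    if i' == 1 then way
    else get_wayLoop n m fuel i' (way ++ PySem.Int.toStr i')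

def get_way (n : Int) (m : Int) : String :=
  get_wayLoop n m n.natAbs 1 "1"

-- ===== PORT B =====
-- Source B's hand-written Euclid 'while b: a, b = b, a % b' (nonnegative ints).
def pyGcdLoop : Nat → Nat → Nat
  | a, 0 => a
  | a, b + 1 => pyGcdLoop (b + 1) (a % (b + 1))
termination_by a b => b
decreasing_by exact Nat.mod_lt _ (Nat.succ_pos _)

def get_way_alt (n : Int) (m : Int) : String :=
  let d := m - 1
  if PySem.Int.mod d n == 0 then "1"
  else
    let g := pyGcdLoop n.natAbs d.natAbs
    let period := n.natAbs / g
    PySem.Str.join "" ((PySem.List.pyRange 0 (period : Int) 1).map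
      (fun k => PySem.Int.toStr (1 + PySem.Int.mod (k * d) n)))

-- ===== PRECONDITION & SPEC =====
-- n = 0 is excluded: both A and B raise ZeroDivisionError at the first '% n' there.
def Pre_get_way (n : Int) (m : Int) : Prop := n ≠ 0
instance (n : Int) (m : Int) : Decidable (Pre_get_way n m) := by unfold Pre_get_way; infer_instance
def pvWitness_get_way : Int × Int := (5, 3)

def Spec_get_way (n : Int) (m : Int) (out : String) : Prop := out = get_way_alt n m
instance (n : Int) (m : Int) (out : String) : Decidable (Spec_get_way n m out) := by unfold Spec_get_way; infer_instance

-- ===== CLAIM (what is proved, stated in full; the proofs are below) =====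
def Claim_equal_get_way : Prop := ∀ (n : Int) (m : Int), Dom_get_way n m → Pre_get_way n m → Spec_get_way n m (get_way n m)

-- ===== LEMMAS AND PROOFS =====

-- Proof-side counter loop: A's loop re-expressed over the step counter k.
def cLoop (n m : Int) : Nat → Int → String → String
  | 0, _, way => way
  | fuel + 1, k, way =>
    let pos := 1 + PySem.Int.mod (k * (m - 1)) n
    if pos == 1 then way
    else cLoop n m fuel (k + 1) (way ++ PySem.Int.toStr pos)

-- Python '%' is Int.fmod; adding a constant to a residue keeps the residue class.
theorem fmod_add_left (x c n : Int) : Int.fmod (Int.fmod x n + c) n = Int.fmod (x + c) n := by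
  conv_rhs => rw [show x + c = (Int.fmod x n + c) + n * (Int.fdiv x n) by
    have := Int.fmod_def x n; linarith]
  rw [Int.add_mul_fmod_self_left]

-- Loop invariant: A's state i and the counter k represent the same residue.
theorem loop_eq (n m : Int) (fuel : Nat) :
    ∀ (k i : Int) (way : String),
      Int.fmod (i + m - 2) n = Int.fmod (k * (m - 1)) n →
      get_wayLoop n m fuel i way = cLoop n m fuel k way := by
  induction fuel with
  | zero => intro k i way _; rfl
  | succ fuel ih =>
    intro k i way h
    simp only [get_wayLoop, cLoop, PySem.Int.mod] at *
    rw [h]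
    split
    · rfl
    · apply ih
      rw [show (1 : Int) + Int.fmod (k * (m - 1)) n + m - 2
            = Int.fmod (k * (m - 1)) n + (m - 1) by ring,
          fmod_add_left]
      congr 1
      ring

theorem flatten_intersperse_nil {α : Type} (l : List (List α)) :
    (List.intersperse ([] : List α) l).flatten = l.flatten := by
  induction l with
  | nil => rfl
  | cons x xs ih => cases xs <;> simp_all [List.intersperse]

theorem join_empty_cons (s : String) (rest : List String) :
    PySem.Str.join "" (s :: rest) = s ++ PySem.Str.join "" rest := by
  simp [PySem.Str.join, PySem.Chars.join, List.intercalate, flatten_intersperse_nil,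
    String.ofList_append, String.ofList_toList]

-- Source B's Euclid computes gcd.
theorem pyGcd_eq (b a : Nat) : pyGcdLoop a b = Nat.gcd b a := by
  induction b using Nat.strong_induction_on generalizing a with
  | _ b ih =>
    cases b with
    | zero => simp [pyGcdLoop]
    | succ c =>
      rw [pyGcdLoop, ih (a % (c + 1)) (Nat.mod_lt _ (Nat.succ_pos _)) (c + 1), ← Nat.gcd_rec]

-- n ∣ k·d  ↔  the period |n|/gcd(|n|,|d|) divides k.
theorem dvd_iff_period (n d : Int) (k : Nat) (hn : n ≠ 0) :
    (n ∣ (k : Int) * d) ↔ (n.natAbs / Nat.gcd n.natAbs d.natAbs) ∣ k := by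
  have hN : 0 < n.natAbs := Int.natAbs_pos.mpr hn
  have hg : 0 < Nat.gcd n.natAbs d.natAbs := Nat.gcd_pos_of_pos_left _ hN
  have h1 : (n ∣ (k : Int) * d) ↔ n.natAbs ∣ k * d.natAbs := by
    rw [← Int.natAbs_dvd_natAbs, Int.natAbs_mul, Int.natAbs_natCast]
  rw [h1]
  constructor
  · intro h
    have cop : Nat.Coprime (n.natAbs / Nat.gcd n.natAbs d.natAbs)
        (d.natAbs / Nat.gcd n.natAbs d.natAbs) := Nat.coprime_div_gcd_div_gcd hg
    have h2 : n.natAbs / Nat.gcd n.natAbs d.natAbs * Nat.gcd n.natAbs d.natAbs ∣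
        k * (d.natAbs / Nat.gcd n.natAbs d.natAbs) * Nat.gcd n.natAbs d.natAbs := by
      rw [Nat.div_mul_cancel (Nat.gcd_dvd_left _ _), Nat.mul_assoc,
        Nat.div_mul_cancel (Nat.gcd_dvd_right _ _)]
      exact h
    exact cop.dvd_of_dvd_mul_right ((Nat.mul_dvd_mul_iff_right hg).mp h2)
  · rintro ⟨t, ht⟩
    have h2 : n.natAbs / Nat.gcd n.natAbs d.natAbs * Nat.gcd n.natAbs d.natAbs ∣
        n.natAbs / Nat.gcd n.natAbs d.natAbs * (t * d.natAbs) :=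
      Nat.mul_dvd_mul_left _ ((Nat.gcd_dvd_right _ _).mul_left t)
    rw [Nat.div_mul_cancel (Nat.gcd_dvd_left _ _)] at h2
    rw [ht, Nat.mul_assoc]
    exact h2

-- The counter loop, run from j with enough fuel, appends exactly the closed-form join.
theorem cLoop_join (n m : Int) (L : Nat)
    (hL : ∀ k : Nat, (1 + PySem.Int.mod ((k : Int) * (m - 1)) n = 1) ↔ L ∣ k) :
    ∀ (fuel j : Nat) (way : String), 1 ≤ j → j ≤ L → L - j < fuel →
      cLoop n m fuel (j : Int) way =
        way ++ PySem.Str.join "" ((PySem.List.pyRange (j : Int) (L : Int) 1).map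
          (fun k => PySem.Int.toStr (1 + PySem.Int.mod (k * (m - 1)) n))) := by
  intro fuel
  induction fuel with
  | zero => intro j way _ _ h; omega
  | succ fuel ih =>
    intro j way hj1 hjL hfuel
    by_cases hj : j = L
    · subst hj
      have hpos : 1 + PySem.Int.mod ((j : Int) * (m - 1)) n = 1 := (hL j).mpr dvd_rfl
      simp [cLoop, hpos, PySem.List.pyRange_one_eq_nil (le_refl (j : Int)), PySem.Str.join,
        PySem.Chars.join, List.intercalate]
    · have hjlt : j < L := lt_of_le_of_ne hjL hj
      have hndvd : ¬ L ∣ j := fun hdvd => absurd (Nat.le_of_dvd (by omega) hdvd) (by omega)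
      have hpos : ¬ (1 + PySem.Int.mod ((j : Int) * (m - 1)) n = 1) := fun h => hndvd ((hL j).mp h)
      have hcast : ((j : Int)) + 1 = ((j + 1 : Nat) : Int) := by push_cast; ring
      have hjc : (j : Int) < (L : Int) := by exact_mod_cast hjlt
      rw [cLoop]
      simp only [beq_iff_eq, if_neg hpos]
      conv_rhs => rw [PySem.List.pyRange_one_cons hjc, List.map_cons, join_empty_cons,
        ← String.append_assoc, hcast]
      rw [hcast]
      exact ih (j + 1) _ (by omega) (by omega) (by omega)

-- ===== VERDICT (by name: the statement is the Claim_ definition above) =====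
theorem get_way_spec : Claim_equal_get_way := by
  intro n m _ hn
  unfold Spec_get_way get_way get_way_alt
  have hN : 0 < n.natAbs := Int.natAbs_pos.mpr hn
  have hA : get_wayLoop n m n.natAbs 1 "1" = cLoop n m n.natAbs 1 "1" :=
    loop_eq n m n.natAbs 1 1 "1" (by ring_nf)
  rw [hA]
  by_cases h0 : PySem.Int.mod (m - 1) n = 0
  · -- first step returns to 1 immediately: both sides are "1"
    obtain ⟨f, hf⟩ : ∃ f, n.natAbs = f + 1 := ⟨n.natAbs - 1, by omega⟩
    rw [hf]
    simp [cLoop, h0]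
  · simp only [beq_iff_eq, if_neg h0]
    have hgcd : pyGcdLoop n.natAbs (m - 1).natAbs = Nat.gcd n.natAbs (m - 1).natAbs := by
      rw [pyGcd_eq, Nat.gcd_comm]
    rw [hgcd]
    have hg : 0 < Nat.gcd n.natAbs (m - 1).natAbs := Nat.gcd_pos_of_pos_left _ hN
    set L := n.natAbs / Nat.gcd n.natAbs (m - 1).natAbs with hLdef
    have hL : ∀ k : Nat, (1 + PySem.Int.mod ((k : Int) * (m - 1)) n = 1) ↔ L ∣ k := by
      intro k
      rw [show (1 + PySem.Int.mod ((k : Int) * (m - 1)) n = 1) ↔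
            PySem.Int.mod ((k : Int) * (m - 1)) n = 0 by omega,
        PySem.Int.mod_eq_zero_iff_dvd]
      exact dvd_iff_period n (m - 1) k hn
    have hL1 : 1 ≤ L := Nat.div_pos (Nat.le_of_dvd hN (Nat.gcd_dvd_left _ _)) hg
    have hLN : L ≤ n.natAbs := Nat.div_le_self _ _
    have hmain := cLoop_join n m L hL n.natAbs 1 "1" (le_refl 1) hL1 (by omega)
    rw [show ((1 : Nat) : Int) = (1 : Int) by norm_cast] at hmain
    rw [hmain]
    have hrange : PySem.List.pyRange 0 (L : Int) 1 = 0 :: PySem.List.pyRange 1 (L : Int) 1 :=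
      PySem.List.pyRange_one_cons (by exact_mod_cast hL1)
    rw [hrange, List.map_cons, join_empty_cons]
    have h00 : PySem.Int.toStr (1 + PySem.Int.mod ((0 : Int) * (m - 1)) n) = "1" := by
      norm_num [PySem.Int.mod]
      decide
    rw [h00]
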